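-- pv_equiv track=rewrite | github.com/chuoihat/dataset_pipeline_and_detecting_SSH_bruteforce_attack | src/step3c_merge.py | _build_hourly_timeline
-- ===== SOURCE A (Python) =====
-- from collections import Counter, defaultdict
--
-- def _build_hourly_timeline(events: list[dict]) -> tuple[list[str], list[int]]:
--     buckets: dict[str, int] = defaultdict(int)
--     for ev in events:
--         ts = ev.get('timestamp', '')
--         if len(ts) >= 13:
--             buckets[ts[:13]] += 1
--     if not buckets:
--         return [], []
--     sorted_keys = sorted(buckets.keys())
--     return sorted_keys, [buckets[k] for k in sorted_keys]
-- ===== SOURCE B (Python) =====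
-- def _build_hourly_timeline(events):
--     hours = sorted(ev.get('timestamp', '')[:13] for ev in events
--                    if len(ev.get('timestamp', '')) >= 13)
--     keys, counts = [], []
--     cur = None
--     n = 0
--     for h in hours:
--         if h == cur:
--             n += 1
--         else:
--             if cur is not None:
--                 keys.append(cur)
--                 counts.append(n)
--             cur = h
--             n = 1
--     if cur is not None:
--         keys.append(cur)
--         counts.append(n)
--     return keys, counts
-- ===== Notes on version B (the rewrite author's own statement) =====
-- stated objective: idiomatic
-- what changed: B keeps no dict: it builds the flat list of 13-char hour prefixes, sorts it, and emits each distinct key with its consecutive-run length in one linear scan, instead of maintaining a defaultdict counter and re-looking up every sorted key.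
import Mathlib
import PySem

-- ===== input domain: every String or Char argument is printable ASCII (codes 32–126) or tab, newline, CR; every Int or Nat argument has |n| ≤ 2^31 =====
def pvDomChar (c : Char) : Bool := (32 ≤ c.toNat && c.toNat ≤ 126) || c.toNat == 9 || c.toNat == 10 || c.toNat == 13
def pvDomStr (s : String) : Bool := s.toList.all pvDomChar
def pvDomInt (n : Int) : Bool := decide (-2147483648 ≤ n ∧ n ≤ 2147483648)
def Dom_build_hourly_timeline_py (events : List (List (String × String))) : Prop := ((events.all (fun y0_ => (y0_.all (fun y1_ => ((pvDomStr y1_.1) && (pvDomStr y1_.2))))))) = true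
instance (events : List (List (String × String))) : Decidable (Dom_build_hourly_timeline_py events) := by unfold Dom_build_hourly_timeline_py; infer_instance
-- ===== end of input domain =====

-- B drops the dict: it sorts the flat list of hour prefixes and counts consecutive runs in one scan (objective: idiomatic; same value, same order).

-- ===== PORT A =====
def build_hourly_timeline_py (events : List (List (String × String))) : List String × List Int :=
  let buckets : PySem.Dict String Int :=
    events.foldl (fun d ev =>
      let ts := PySem.Dict.getD ⟨ev⟩ "timestamp" ""
      if 13 ≤ PySem.Str.len ts then d.modify (PySem.Str.slice ts none (some 13)) 0 (· + 1) else d)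
      PySem.Dict.empty
  if buckets.size = 0 then ([], [])
  else
    let sorted_keys := PySem.List.sorted buckets.keys (fun x => x) false
    (sorted_keys, sorted_keys.map (fun k => buckets.getD k 0))

-- ===== PORT B =====
-- B's 'for h in hours' run-counting loop, as structural recursion on the remaining hours
-- with the loop state (cur, n); emits (cur, n) when a new key starts, and once at the end
def pvGrp : List String → String → Int → List String × List Int
  | [], c, n => ([c], [n])
  | h :: t, c, n =>
    if h = c then pvGrp t c (n + 1)
    else
      let r := pvGrp t h 1
      (c :: r.1, n :: r.2)

def build_hourly_timeline_py_alt (events : List (List (String × String))) : List String × List Int :=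
  let hours := PySem.List.sorted
    ((events.filter (fun ev => 13 ≤ PySem.Str.len (PySem.Dict.getD ⟨ev⟩ "timestamp" ""))).map
      (fun ev => PySem.Str.slice (PySem.Dict.getD ⟨ev⟩ "timestamp" "") none (some 13)))
    (fun x => x) false
  match hours with
  | [] => ([], [])          -- the loop never runs: cur stays None
  | h :: t => pvGrp t h 1   -- first iteration sets cur = h, n = 1

-- ===== PRECONDITION & SPEC =====
def Spec_build_hourly_timeline_py (events : List (List (String × String))) (out : List String × List Int) : Prop := out = build_hourly_timeline_py_alt events
instance (events : List (List (String × String))) (out : List String × List Int) : Decidable (Spec_build_hourly_timeline_py events out) := by unfold Spec_build_hourly_timeline_py; infer_instance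

-- ===== CLAIM (what is proved, stated in full; the proofs are below) =====
def Claim_equal_build_hourly_timeline_py : Prop := ∀ (events : List (List (String × String))), Dom_build_hourly_timeline_py events → Spec_build_hourly_timeline_py events (build_hourly_timeline_py events)

-- ===== LEMMAS AND PROOFS =====

-- the flat list of hour prefixes, and its sorted version
def pvPs (events : List (List (String × String))) : List String :=
  (events.filter (fun ev => 13 ≤ PySem.Str.len (PySem.Dict.getD ⟨ev⟩ "timestamp" ""))).map
    (fun ev => PySem.Str.slice (PySem.Dict.getD ⟨ev⟩ "timestamp" "") none (some 13))

def pvSp (events : List (List (String × String))) : List String :=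
  PySem.List.sorted (pvPs events) (fun x => x) false

-- adjacent dedup and run lengths of a list (proof-side characterisation of pvGrp)
def pvDedup : List String → List String
  | [] => []
  | [a] => [a]
  | a :: b :: t => if a = b then pvDedup (b :: t) else a :: pvDedup (b :: t)

def pvRuns : List String → List Int
  | [] => []
  | [_] => [1]
  | a :: b :: t => if a = b then
      match pvRuns (b :: t) with
      | [] => []
      | x :: r => (x + 1) :: r
    else 1 :: pvRuns (b :: t)

def pvBump (k : Int) : List Int → List Int
  | [] => []
  | x :: r => (x + k) :: r

theorem pvRuns_ne_nil (a : String) (l : List String) : pvRuns (a :: l) ≠ [] := by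
  induction l generalizing a with
  | nil => simp [pvRuns]
  | cons b t ih =>
    rw [pvRuns]
    split
    · rcases hx : pvRuns (b :: t) with _ | ⟨x, r⟩
      · exact absurd hx (ih b)
      · simp
    · simp

theorem pvGrp_eq (l : List String) (c : String) (n : Int) :
    pvGrp l c n = (pvDedup (c :: l), pvBump (n - 1) (pvRuns (c :: l))) := by
  induction l generalizing c n with
  | nil => simp [pvGrp, pvDedup, pvRuns, pvBump]
  | cons h t ih =>
    by_cases hc : h = c
    · subst hc
      rw [pvGrp, if_pos rfl, ih h (n + 1)]
      have hd : pvDedup (h :: h :: t) = pvDedup (h :: t) := by rw [pvDedup, if_pos rfl]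
      have hr : pvRuns (h :: h :: t) = pvBump 1 (pvRuns (h :: t)) := by
        rw [pvRuns]
        rcases pvRuns (h :: t) with _ | ⟨x, r⟩ <;> simp [pvBump]
      rw [hd, hr]
      rcases pvRuns (h :: t) with _ | ⟨x, r⟩ <;> simp [pvBump]
    · rw [pvGrp, if_neg hc, ih h 1]
      have hd : pvDedup (c :: h :: t) = c :: pvDedup (h :: t) := by
        rw [pvDedup, if_neg (fun e => hc (Eq.symm e))]
      have hr : pvRuns (c :: h :: t) = 1 :: pvRuns (h :: t) := by
        rw [pvRuns]; simp only [if_neg (fun e => hc (Eq.symm e))]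
      rw [hd, hr]
      simp only [pvBump]
      rcases hx : pvRuns (h :: t) with _ | ⟨x, r⟩
      · exact absurd hx (pvRuns_ne_nil h t)
      · simp

theorem pvBump_zero (l : List Int) : pvBump 0 l = l := by
  cases l <;> simp [pvBump]

theorem pvAlt_eq (events : List (List (String × String))) :
    build_hourly_timeline_py_alt events = (pvDedup (pvSp events), pvRuns (pvSp events)) := by
  have h0 : build_hourly_timeline_py_alt events =
      (match pvSp events with | [] => (([] : List String), ([] : List Int)) | h :: t => pvGrp t h 1) := rfl
  rw [h0]
  rcases pvSp events with _ | ⟨h, t⟩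
  · simp [pvDedup, pvRuns]
  · show pvGrp t h 1 = _
    rw [pvGrp_eq]
    norm_num [pvBump_zero]

theorem pvDedup_mem (l : List String) (x : String) : x ∈ pvDedup l ↔ x ∈ l := by
  induction l using pvDedup.induct with
  | case1 => simp [pvDedup]
  | case2 a => simp [pvDedup]
  | case3 b t ih => rw [pvDedup, if_pos rfl, ih]; simp
  | case4 a b t hab ih => rw [pvDedup, if_neg hab]; simp [ih]

theorem pvDedup_head (t : List String) (b : String) : ∃ r, pvDedup (b :: t) = b :: r := by
  induction t generalizing b with
  | nil => exact ⟨[], rfl⟩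
  | cons h t ih =>
    by_cases hb : b = h
    · subst hb; obtain ⟨r, hr⟩ := ih b; exact ⟨r, by rw [pvDedup, if_pos rfl, hr]⟩
    · exact ⟨pvDedup (h :: t), by rw [pvDedup, if_neg hb]⟩

theorem pvSortedLt (a b : String) (t : List String) (h : (a :: b :: t).Pairwise (· ≤ ·))
    (hab : a ≠ b) (x : String) (hx : x ∈ b :: t) : a < x := by
  have hb : a ≤ b := (List.pairwise_cons.mp h).1 b (by simp)
  have hlt : a < b := lt_of_le_of_ne hb hab
  rcases List.mem_cons.mp hx with rfl | hx
  · exact hlt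
  · have := (List.pairwise_cons.mp (List.pairwise_cons.mp h).2).1 x hx
    exact lt_of_lt_of_le hlt this

theorem pvDedup_pairwise (l : List String) (h : l.Pairwise (· ≤ ·)) :
    (pvDedup l).Pairwise (· < ·) := by
  revert h
  induction l using pvDedup.induct with
  | case1 => intro _; simp [pvDedup]
  | case2 a => intro _; simp [pvDedup]
  | case3 b t ih => intro h; rw [pvDedup, if_pos rfl]; exact ih (List.pairwise_cons.mp h).2
  | case4 a b t hab ih =>
    intro h
    rw [pvDedup, if_neg hab]
    refine List.pairwise_cons.mpr ⟨?_, ih (List.pairwise_cons.mp h).2⟩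
    intro x hx
    exact pvSortedLt a b t h hab x ((pvDedup_mem (b :: t) x).mp hx)

theorem pvRuns_eq_counts (l : List String) (h : l.Pairwise (· ≤ ·)) :
    pvRuns l = (pvDedup l).map (fun k => (l.count k : Int)) := by
  revert h
  induction l using pvRuns.induct with
  | case1 => intro _; simp [pvRuns, pvDedup]
  | case2 a => intro _; simp [pvRuns, pvDedup]
  | case3 b t hnil _ => exact absurd hnil (pvRuns_ne_nil b t)
  | case4 b t x r hx ih =>
    intro h
    have ht : (b :: t).Pairwise (· ≤ ·) := (List.pairwise_cons.mp h).2
    have hd : pvDedup (b :: b :: t) = pvDedup (b :: t) := by rw [pvDedup, if_pos rfl]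
    have hrw : pvRuns (b :: b :: t) = (x + 1) :: r := by
      rw [pvRuns]; simp [hx]
    obtain ⟨r2, hr2⟩ := pvDedup_head t b
    have hpw := pvDedup_pairwise (b :: t) ht
    rw [hr2] at hpw
    have hih := ih ht
    rw [hx, hr2] at hih
    simp only [List.map_cons, List.cons.injEq] at hih
    obtain ⟨hx1, hr1⟩ := hih
    rw [hrw, hd, hr2]
    simp only [List.map_cons, List.cons.injEq]
    constructor
    · rw [hx1]
      have : List.count b (b :: b :: t) = List.count b (b :: t) + 1 := by
        simp
      rw [this]
      push_cast
      ring
    · rw [hr1]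
      refine List.map_congr_left ?_
      intro y hy
      have hyb : y ≠ b := by
        intro e
        exact absurd (e ▸ (List.pairwise_cons.mp hpw).1 y hy) (lt_irrefl b)
      simp [Ne.symm hyb]
  | case5 a b t hab ih =>
    intro h
    have ht : (b :: t).Pairwise (· ≤ ·) := (List.pairwise_cons.mp h).2
    rw [pvRuns, if_neg hab, pvDedup, if_neg hab, ih ht]
    have hnotin : a ∉ b :: t := by
      intro hmem
      exact absurd (pvSortedLt a b t h hab a hmem) (lt_irrefl a)
    simp only [List.map_cons]
    congr 1
    · have : List.count a (a :: b :: t) = 1 := by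
        rw [List.count_cons_self, List.count_eq_zero_of_not_mem hnotin]
      rw [this]
      norm_num
    · refine List.map_congr_left ?_
      intro y hy
      have hya : y ≠ a := by
        intro e
        exact absurd (pvSortedLt a b t h hab y (e ▸ (pvDedup_mem (b :: t) y).mp hy)) (e ▸ lt_irrefl a)
      simp [Ne.symm hya]

theorem pvSp_pairwise (events : List (List (String × String))) :
    (pvSp events).Pairwise (· ≤ ·) := by
  have := PySem.List.sorted_pairwise (pvPs events) (fun x => x)
  exact List.Pairwise.imp (fun {a b} a_1 => a_1) this

-- A's dict is Counter(prefixes)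
theorem pvBuckets_eq (events : List (List (String × String))) :
    (events.foldl (fun d ev =>
      let ts := PySem.Dict.getD ⟨ev⟩ "timestamp" ""
      if 13 ≤ PySem.Str.len ts then d.modify (PySem.Str.slice ts none (some 13)) 0 (· + 1) else d)
      PySem.Dict.empty) = PySem.Dict.counter (pvPs events) := by
  rw [show (fun (d : PySem.Dict String Int) (ev : List (String × String)) =>
      let ts := PySem.Dict.getD ⟨ev⟩ "timestamp" ""
      if 13 ≤ PySem.Str.len ts then d.modify (PySem.Str.slice ts none (some 13)) 0 (· + 1) else d)
    = (fun (d : PySem.Dict String Int) (ev : List (String × String)) =>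
      if 13 ≤ PySem.Str.len (PySem.Dict.getD ⟨ev⟩ "timestamp" "") then
        d.modify (PySem.Str.slice (PySem.Dict.getD ⟨ev⟩ "timestamp" "") none (some 13)) 0 (· + 1)
      else d) from rfl]
  unfold pvPs
  rw [PySem.List.foldl_ite_eq_foldl_filter]
  rw [PySem.Dict.counter_eq_foldl, List.foldl_map]

-- sorted keys of A's dict are exactly B's run keys
theorem pvKeys_eq (events : List (List (String × String))) :
    PySem.List.sorted (PySem.Dict.counter (pvPs events)).keys (fun x => x) false
      = pvDedup (pvSp events) := by
  rw [PySem.Dict.keys_counter]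
  apply PySem.List.sorted_eq_of_perm_of_pairwise_lt
  · apply (List.perm_ext_iff_of_nodup ?_ ?_).mpr
    · intro x
      simp only [pvDedup_mem, pvSp, PySem.List.mem_sorted, PySem.Set.mem_ofList]
    · exact List.Pairwise.imp ne_of_lt (pvDedup_pairwise _ (pvSp_pairwise events))
    · exact PySem.Set.nodup_ofList _
  · exact pvDedup_pairwise _ (pvSp_pairwise events)

-- ===== VERDICT (by name: the statement is the Claim_ definition above) =====
theorem build_hourly_timeline_py_spec : Claim_equal_build_hourly_timeline_py := by
  intro events _
  show build_hourly_timeline_py events = build_hourly_timeline_py_alt events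
  rw [pvAlt_eq]
  simp only [build_hourly_timeline_py]
  rw [pvBuckets_eq]
  by_cases hps : pvPs events = []
  · have hsp : pvSp events = [] := by
      rw [pvSp, hps]; rfl
    rw [hps, hsp]
    simp [pvDedup, pvRuns, PySem.Dict.counter]
  · have hsz : (PySem.Dict.counter (pvPs events)).size ≠ 0 := by
      intro h0
      apply hps
      have hk : (PySem.Dict.counter (pvPs events)).keys.length = 0 := by
        simpa [PySem.Dict.size, PySem.Dict.keys, List.length_map] using h0
      rw [PySem.Dict.keys_counter] at hk
      have hempty : PySem.Set.ofList (pvPs events) = [] := List.length_eq_zero_iff.mp hk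
      rcases hx : pvPs events with _ | ⟨p, ps⟩
      · rfl
      · have hp : p ∈ PySem.Set.ofList (pvPs events) := by
          rw [PySem.Set.mem_ofList, hx]; simp
        rw [hempty] at hp
        simp at hp
    rw [if_neg hsz]
    rw [pvKeys_eq]
    congr 1
    rw [pvRuns_eq_counts _ (pvSp_pairwise events)]
    refine List.map_congr_left ?_
    intro x _
    rw [PySem.Dict.getD_counter]
    congr 1
    exact ((PySem.List.sorted_perm (pvPs events) (fun x => x) false).count_eq x).symm
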